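-- pv_equiv track=rewrite | github.com/NimbusTA/monitor-scrapper | monitor-scraper/utils.py | distribute_events_by_blocks
-- ===== SOURCE A (Python) =====
-- def distribute_events_by_blocks(events: dict) -> dict:
--     """Distribute events by blocks."""
--     distributed_events = {}
--     for key in events.keys():
--         for event in events[key]:
--             block_number = event.get('blockNumber')
--
--             if block_number not in distributed_events:
--                 distributed_events[block_number] = {}
--                 for k in events.keys():
--                     distributed_events[block_number][k] = []
--
--             distributed_events[block_number][key].append(event)
--
--     return distributed_events
-- ===== SOURCE B (Python) =====
-- def distribute_events_by_blocks(events: dict) -> dict: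
--     """Distribute events by blocks."""
--     order = dict.fromkeys(e.get('blockNumber')
--                           for evs in events.values() for e in evs)
--     return {bn: {k: [e for e in evs if e.get('blockNumber') == bn]
--                  for k, evs in events.items()}
--             for bn in order}
-- ===== Notes on version B (the rewrite author's own statement) =====
-- stated objective: simpler
-- what changed: B first computes the first-seen order of block numbers with dict.fromkeys over the flattened events and then builds the whole result in two comprehensions that filter each key's event list per block, instead of A's single mutating pass with lazy per-block skeleton initialisation and appends.
import Mathlib
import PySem

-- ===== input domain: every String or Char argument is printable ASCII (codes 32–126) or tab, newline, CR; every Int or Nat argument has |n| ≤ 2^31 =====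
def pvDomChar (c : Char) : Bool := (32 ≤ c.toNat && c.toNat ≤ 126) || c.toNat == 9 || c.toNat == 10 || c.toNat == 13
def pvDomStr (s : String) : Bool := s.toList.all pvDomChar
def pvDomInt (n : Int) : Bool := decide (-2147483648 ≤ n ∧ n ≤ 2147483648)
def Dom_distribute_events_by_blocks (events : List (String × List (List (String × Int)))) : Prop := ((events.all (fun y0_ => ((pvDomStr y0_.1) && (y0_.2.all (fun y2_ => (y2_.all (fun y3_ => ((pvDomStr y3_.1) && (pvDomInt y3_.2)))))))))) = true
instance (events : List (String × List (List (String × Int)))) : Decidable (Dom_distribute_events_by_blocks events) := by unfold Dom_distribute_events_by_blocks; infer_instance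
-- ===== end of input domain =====

-- B builds the result by two comprehensions (first-seen block order, then a filter per block/key)
-- instead of A's incremental dict mutation with lazy skeleton initialisation; objective: simpler.
-- event.get('blockNumber') on the event dict (exact: first-match lookup; Pre_ keeps event key lists duplicate-free)
def pvBlockNo (e : List (String × Int)) : Option Int := (PySem.Dict.mk e).get? "blockNumber"

-- ===== PORT A =====
def distribute_events_by_blocks (events : List (String × List (List (String × Int)))) : List (Option Int × List (String × List (List (String × Int)))) :=
  -- distributed_events = {} ; for key in events.keys(): for event in events[key]: …
  let d : PySem.Dict (Option Int) (PySem.Dict String (List (List (String × Int)))) :=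
    events.foldl (fun dist p =>
      p.2.foldl (fun dist event =>
        let bn := pvBlockNo event
        -- if block_number not in distributed_events: fresh {k: [] for k in events.keys()} via the inner for-loop
        let dist := if dist.contains bn then dist
          else dist.insert bn
            (events.foldl (fun inner q => inner.insert q.1 ([] : List (List (String × Int)))) PySem.Dict.empty)
        -- distributed_events[block_number][key].append(event)  (bn is present; key is always a key of the skeleton)
        dist.modify bn PySem.Dict.empty
          (fun inner => inner.modify p.1 [] (fun l => l ++ [event]))) dist) PySem.Dict.empty
  d.items.map (fun q => (q.1, q.2.items))

-- ===== PORT B =====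
def distribute_events_by_blocks_alt (events : List (String × List (List (String × Int)))) : List (Option Int × List (String × List (List (String × Int)))) :=
  -- order = dict.fromkeys(e.get('blockNumber') for evs in events.values() for e in evs)
  let order := PySem.List.dedup (events.flatMap (fun p => p.2.map pvBlockNo))
  -- {bn: {k: [e for e in evs if e.get('blockNumber') == bn] for k, evs in events.items()} for bn in order}
  order.map (fun bn => (bn, events.map (fun p => (p.1, p.2.filter (fun e => pvBlockNo e == bn)))))

-- ===== PRECONDITION & SPEC =====
-- Pre_ excludes association lists with duplicate keys (in the outer events dict or inside an event dict):
-- a Python dict argument cannot carry duplicate keys, so such lists are representation artefacts on which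
-- dict semantics (last value wins, first position) diverges from the association-list reading.
def Pre_distribute_events_by_blocks (events : List (String × List (List (String × Int)))) : Prop :=
  (events.map (fun p => p.1)).Nodup ∧ ∀ p ∈ events, ∀ e ∈ p.2, (e.map (fun q => q.1)).Nodup
instance (events : List (String × List (List (String × Int)))) : Decidable (Pre_distribute_events_by_blocks events) := by unfold Pre_distribute_events_by_blocks; infer_instance

def pvWitness_distribute_events_by_blocks : (List (String × List (List (String × Int)))) :=
  [("Transfer", [[("blockNumber", 1)], [("sender", 7)]]), ("Deposit", [[("blockNumber", 1), ("amount", 3)]])]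

def Spec_distribute_events_by_blocks (events : List (String × List (List (String × Int)))) (out : List (Option Int × List (String × List (List (String × Int))))) : Prop := out = distribute_events_by_blocks_alt events
instance (events : List (String × List (List (String × Int)))) (out : List (Option Int × List (String × List (List (String × Int))))) : Decidable (Spec_distribute_events_by_blocks events out) := by
  unfold Spec_distribute_events_by_blocks
  have h1 : DecidableEq (Option Int) := inferInstance
  have h2 : DecidableEq (List (String × List (List (String × Int)))) := inferInstance
  exact @instDecidableEqList _ (@instDecidableEqProd _ _ h1 h2) _ _

-- ===== CLAIM (what is proved, stated in full; the proofs are below) =====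
def Claim_equal_distribute_events_by_blocks : Prop := ∀ (events : List (String × List (List (String × Int)))), Dom_distribute_events_by_blocks events → Pre_distribute_events_by_blocks events → Spec_distribute_events_by_blocks events (distribute_events_by_blocks events)

-- ===== LEMMAS AND PROOFS =====

-- the stream of (key, event) pairs in A's traversal order
def pvPairs (events : List (String × List (List (String × Int)))) : List (String × List (String × Int)) :=
  events.flatMap (fun p => p.2.map (fun e => (p.1, e)))

-- the events with key k and block b among a stream T
def pvG (T : List (String × List (String × Int))) (b : Option Int) (k : String) : List (List (String × Int)) :=
  (T.filter (fun q => q.1 == k && (pvBlockNo q.2 == b))).map (fun q => q.2)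

def pvInner (ks : List String) (T : List (String × List (String × Int))) (b : Option Int) : PySem.Dict String (List (List (String × Int))) :=
  PySem.Dict.mk (ks.map (fun k => (k, pvG T b k)))

def pvModel (ks : List String) (T : List (String × List (String × Int))) : PySem.Dict (Option Int) (PySem.Dict String (List (List (String × Int)))) :=
  PySem.Dict.mk ((PySem.Set.ofList (T.map (fun q => pvBlockNo q.2))).map (fun b => (b, pvInner ks T b)))

-- generic facts about Dict.mk (ks.map (fun k => (k, g k)))
theorem pv_keys_mkmap {κ ν : Type} (ks : List κ) (g : κ → ν) :
    (PySem.Dict.mk (ks.map (fun k => (k, g k)))).keys = ks := by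
  simp [PySem.Dict.keys_mk, Function.comp_def]

theorem pv_getD_mkmap {κ ν : Type} [BEq κ] [LawfulBEq κ] (ks : List κ) (g : κ → ν) (k : κ)
    (hnd : ks.Nodup) (hk : k ∈ ks) (dflt : ν) :
    (PySem.Dict.mk (ks.map (fun k => (k, g k)))).getD k dflt = g k := by
  apply PySem.Dict.getD_of_mem_items
  · exact List.mem_map.mpr ⟨k, hk, rfl⟩
  · rw [pv_keys_mkmap]; exact hnd

theorem pv_dict_eq {κ ν : Type} [BEq κ] [LawfulBEq κ] (d d' : PySem.Dict κ ν) (dflt : ν)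
    (hnd : d.keys.Nodup) (hk : d.keys = d'.keys)
    (h : ∀ k ∈ d.keys, d.getD k dflt = d'.getD k dflt) : d = d' := by
  apply PySem.Dict.ext
  rw [PySem.Dict.items_eq_map_keys d hnd dflt, PySem.Dict.items_eq_map_keys d' (hk ▸ hnd) dflt, ← hk]
  exact List.map_congr_left (fun k hkm => by rw [h k hkm])

theorem pv_keys_model (ks : List String) (T : List (String × List (String × Int))) :
    (pvModel ks T).keys = PySem.Set.ofList (T.map (fun q => pvBlockNo q.2)) := by
  exact pv_keys_mkmap _ _

theorem pv_contains_model (ks : List String) (T : List (String × List (String × Int))) (b : Option Int) :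
    (pvModel ks T).contains b = decide (b ∈ PySem.Set.ofList (T.map (fun q => pvBlockNo q.2))) := by
  rw [PySem.Dict.contains_eq_decide_mem_keys, pv_keys_model]

theorem pv_getD_model (ks : List String) (T : List (String × List (String × Int))) (b : Option Int)
    (hb : b ∈ PySem.Set.ofList (T.map (fun q => pvBlockNo q.2))) :
    (pvModel ks T).getD b PySem.Dict.empty = pvInner ks T b :=
  pv_getD_mkmap _ _ _ (PySem.Set.nodup_ofList _) hb _

-- filtering for a block that never occurs in T gives []
theorem pv_pvG_nil (T : List (String × List (String × Int))) (b : Option Int) (k : String)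
    (hb : b ∉ T.map (fun q => pvBlockNo q.2)) : pvG T b k = [] := by
  unfold pvG
  rw [List.map_eq_nil_iff, List.filter_eq_nil_iff]
  intro q hq
  simp only [Bool.and_eq_true, beq_iff_eq, not_and]
  intro _ hbn
  exact hb (List.mem_map.mpr ⟨q, hq, hbn⟩)

-- appending one pair extends pvG
theorem pv_pvG_append (T : List (String × List (String × Int))) (b : Option Int) (k key : String)
    (e : List (String × Int)) :
    pvG (T ++ [(key, e)]) b k = pvG T b k ++ (if key = k ∧ pvBlockNo e = b then [e] else []) := by
  unfold pvG
  rw [List.filter_append, List.map_append]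
  congr 1
  by_cases h : key = k ∧ pvBlockNo e = b
  · simp [List.filter, h.1, h.2]
  · rw [if_neg h]
    simp only [List.filter]
    split
    · rename_i hcond
      simp only [Bool.and_eq_true, beq_iff_eq] at hcond
      exact absurd hcond h
    · rfl

-- the inner mutation of A advances the inner model by one pair
theorem pv_inner_step (ks : List String) (T : List (String × List (String × Int)))
    (key : String) (e : List (String × Int)) (hnd : ks.Nodup) (hkey : key ∈ ks) :
    (pvInner ks T (pvBlockNo e)).modify key [] (fun l => l ++ [e]) = pvInner ks (T ++ [(key, e)]) (pvBlockNo e) := by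
  have hcont : (pvInner ks T (pvBlockNo e)).contains key = true := by
    rw [PySem.Dict.contains_eq_decide_mem_keys]
    unfold pvInner
    rw [pv_keys_mkmap]
    exact decide_eq_true hkey
  apply pv_dict_eq _ _ ([] : List (List (String × Int)))
  · rw [PySem.Dict.keys_modify, PySem.Dict.keys_insert_of_contains _ _ hcont]
    unfold pvInner
    rw [pv_keys_mkmap]
    exact hnd
  · rw [PySem.Dict.keys_modify, PySem.Dict.keys_insert_of_contains _ _ hcont]
    unfold pvInner
    rw [pv_keys_mkmap, pv_keys_mkmap]
  · intro k hk
    rw [PySem.Dict.keys_modify, PySem.Dict.keys_insert_of_contains _ _ hcont] at hk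
    unfold pvInner at hk
    rw [pv_keys_mkmap] at hk
    rw [PySem.Dict.getD_modify]
    unfold pvInner
    by_cases hkk : k = key
    · subst hkk
      rw [if_pos rfl, pv_getD_mkmap _ _ _ hnd hkey, pv_getD_mkmap _ _ _ hnd hkey, pv_pvG_append]
      simp
    · rw [if_neg hkk, pv_getD_mkmap _ _ _ hnd hk, pv_getD_mkmap _ _ _ hnd hk, pv_pvG_append,
        if_neg (fun h : key = k ∧ _ => hkk h.1.symm), List.append_nil]

-- pvInner unchanged for other blocks
theorem pv_inner_other (ks : List String) (T : List (String × List (String × Int)))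
    (b : Option Int) (key : String) (e : List (String × Int)) (hb : b ≠ pvBlockNo e) :
    pvInner ks T b = pvInner ks (T ++ [(key, e)]) b := by
  unfold pvInner
  congr 1
  apply List.map_congr_left
  intro k _
  rw [pv_pvG_append, if_neg (fun h : key = k ∧ pvBlockNo e = b => hb h.2.symm), List.append_nil]

-- A's skeleton is the inner model of the empty stream
theorem pv_skel (events : List (String × List (List (String × Int))))
    (hnd : (events.map (fun p => p.1)).Nodup) :
    events.foldl (fun inner q => inner.insert q.1 ([] : List (List (String × Int)))) PySem.Dict.empty
      = PySem.Dict.mk ((events.map (fun p => p.1)).map (fun k => (k, ([] : List (List (String × Int)))))) := by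
  apply PySem.Dict.ext
  rw [PySem.Dict.items_foldl_insert_fresh events (fun q => q.1) (fun _ => []) PySem.Dict.empty
    (fun a _ => PySem.Dict.contains_empty _) hnd]
  simp [PySem.Dict.empty, Function.comp_def]

-- one step of A's loop body advances the model by one pair
theorem pv_step (events : List (String × List (List (String × Int))))
    (T : List (String × List (String × Int))) (key : String) (e : List (String × Int))
    (hnd : (events.map (fun p => p.1)).Nodup) (hkey : key ∈ events.map (fun p => p.1)) :
    (let bn := pvBlockNo e
     let dist := if (pvModel (events.map (fun p => p.1)) T).contains bn then pvModel (events.map (fun p => p.1)) T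
       else (pvModel (events.map (fun p => p.1)) T).insert bn
         (events.foldl (fun inner q => inner.insert q.1 ([] : List (List (String × Int)))) PySem.Dict.empty)
     dist.modify bn PySem.Dict.empty (fun inner => inner.modify key [] (fun l => l ++ [e])))
      = pvModel (events.map (fun p => p.1)) (T ++ [(key, e)]) := by
  have hndk : (events.map (fun p => p.1)).Nodup := hnd
  have hOn : (PySem.Set.ofList (T.map (fun q => pvBlockNo q.2))).Nodup := PySem.Set.nodup_ofList _
  have hnewkeys : PySem.Set.ofList ((T ++ [(key, e)]).map (fun q => pvBlockNo q.2))
      = (PySem.Set.ofList (T.map (fun q => pvBlockNo q.2))).add (pvBlockNo e) := by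
    rw [List.map_append, PySem.Set.ofList_append]
    simp [PySem.Set.update_cons, PySem.Set.update_nil]
  have hmemnew : pvBlockNo e ∈ PySem.Set.ofList ((T ++ [(key, e)]).map (fun q => pvBlockNo q.2)) := by
    rw [PySem.Set.mem_ofList, List.map_append]
    exact List.mem_append_right _ (by simp)
  dsimp only
  by_cases hc : pvBlockNo e ∈ PySem.Set.ofList (T.map (fun q => pvBlockNo q.2))
  · have haddeq : (PySem.Set.ofList (T.map (fun q => pvBlockNo q.2))).add (pvBlockNo e)
        = PySem.Set.ofList (T.map (fun q => pvBlockNo q.2)) := by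
      unfold PySem.Set.add
      rw [if_pos (by simpa [PySem.Set.contains, List.contains_iff_mem] using hc)]
    rw [pv_contains_model, if_pos (decide_eq_true hc)]
    apply pv_dict_eq _ _ PySem.Dict.empty
    · rw [PySem.Dict.keys_modify,
        PySem.Dict.keys_insert_of_contains _ _ (by rw [pv_contains_model]; exact decide_eq_true hc),
        pv_keys_model]
      exact hOn
    · rw [PySem.Dict.keys_modify,
        PySem.Dict.keys_insert_of_contains _ _ (by rw [pv_contains_model]; exact decide_eq_true hc),
        pv_keys_model, pv_keys_model, hnewkeys, haddeq]
    · intro b hb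
      rw [PySem.Dict.keys_modify,
        PySem.Dict.keys_insert_of_contains _ _ (by rw [pv_contains_model]; exact decide_eq_true hc),
        pv_keys_model] at hb
      rw [PySem.Dict.getD_modify]
      by_cases hbb : b = pvBlockNo e
      · subst hbb
        rw [if_pos rfl, pv_getD_model _ _ _ hc, pv_inner_step _ _ _ _ hndk hkey,
          pv_getD_model _ _ _ hmemnew]
      · rw [if_neg hbb, pv_getD_model _ _ _ hb,
          pv_getD_model _ _ _ (by rw [hnewkeys, haddeq]; exact hb),
          pv_inner_other _ _ _ _ _ hbb]
  · have hcontf : (pvModel (events.map (fun p => p.1)) T).contains (pvBlockNo e) = false := by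
      rw [pv_contains_model]
      exact decide_eq_false hc
    have hnotT : pvBlockNo e ∉ T.map (fun q => pvBlockNo q.2) := by
      intro h
      exact hc ((PySem.Set.mem_ofList _ _).mpr h)
    have haddapp : (PySem.Set.ofList (T.map (fun q => pvBlockNo q.2))).add (pvBlockNo e)
        = PySem.Set.ofList (T.map (fun q => pvBlockNo q.2)) ++ [pvBlockNo e] := by
      unfold PySem.Set.add
      rw [if_neg (by simpa [PySem.Set.contains, List.contains_iff_mem] using hc)]
    have hskel : events.foldl (fun inner q => inner.insert q.1 ([] : List (List (String × Int)))) PySem.Dict.empty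
        = pvInner (events.map (fun p => p.1)) T (pvBlockNo e) := by
      rw [pv_skel _ hndk]
      unfold pvInner
      congr 1
      apply List.map_congr_left
      intro k _
      rw [pv_pvG_nil _ _ _ hnotT]
    rw [pv_contains_model, if_neg (by simp [hc]), hskel]
    have hcontins : ((pvModel (events.map (fun p => p.1)) T).insert (pvBlockNo e)
        (pvInner (events.map (fun p => p.1)) T (pvBlockNo e))).contains (pvBlockNo e) = true :=
      PySem.Dict.contains_insert_self _ _ _
    have hkeysins : ((pvModel (events.map (fun p => p.1)) T).insert (pvBlockNo e)
        (pvInner (events.map (fun p => p.1)) T (pvBlockNo e))).keys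
        = PySem.Set.ofList (T.map (fun q => pvBlockNo q.2)) ++ [pvBlockNo e] := by
      rw [PySem.Dict.keys_insert_of_not_contains _ _ hcontf, pv_keys_model]
    apply pv_dict_eq _ _ PySem.Dict.empty
    · rw [PySem.Dict.keys_modify, PySem.Dict.keys_insert_of_contains _ _ hcontins, hkeysins]
      rw [List.nodup_append]
      refine ⟨hOn, List.nodup_singleton _, ?_⟩
      intro a ha b hb
      rw [List.mem_singleton] at hb
      subst hb
      intro heq
      exact hc (heq ▸ ha)
    · rw [PySem.Dict.keys_modify, PySem.Dict.keys_insert_of_contains _ _ hcontins, hkeysins,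
        pv_keys_model, hnewkeys, haddapp]
    · intro b hb
      rw [PySem.Dict.keys_modify, PySem.Dict.keys_insert_of_contains _ _ hcontins, hkeysins] at hb
      rw [PySem.Dict.getD_modify]
      by_cases hbb : b = pvBlockNo e
      · subst hbb
        rw [if_pos rfl, PySem.Dict.getD_insert, if_pos rfl, pv_inner_step _ _ _ _ hndk hkey,
          pv_getD_model _ _ _ hmemnew]
      · have hbO : b ∈ PySem.Set.ofList (T.map (fun q => pvBlockNo q.2)) := by
          rcases List.mem_append.mp hb with h | h
          · exact h
          · simp at h; exact absurd h hbb
        rw [if_neg hbb, PySem.Dict.getD_insert, if_neg hbb, pv_getD_model _ _ _ hbO,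
          pv_getD_model _ _ _ (by rw [hnewkeys, haddapp]; exact List.mem_append_left _ hbO),
          pv_inner_other _ _ _ _ _ hbb]

theorem pv_fold (events : List (String × List (List (String × Int))))
    (S T : List (String × List (String × Int)))
    (hnd : (events.map (fun p => p.1)).Nodup) (hS : ∀ q ∈ S, q.1 ∈ events.map (fun p => p.1)) :
    S.foldl (fun dist q =>
        let bn := pvBlockNo q.2
        let dist := if dist.contains bn then dist
          else dist.insert bn
            (events.foldl (fun inner r => inner.insert r.1 ([] : List (List (String × Int)))) PySem.Dict.empty)
        dist.modify bn PySem.Dict.empty (fun inner => inner.modify q.1 [] (fun l => l ++ [q.2])))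
      (pvModel (events.map (fun p => p.1)) T)
      = pvModel (events.map (fun p => p.1)) (T ++ S) := by
  induction S generalizing T with
  | nil => simp
  | cons q S ih =>
    rw [List.foldl_cons]
    have h1 := pv_step events T q.1 q.2 hnd (hS q (List.mem_cons_self))
    dsimp only at h1 ⊢
    rw [h1]
    have h2 := ih (T ++ [(q.1, q.2)]) (fun r hr => hS r (List.mem_cons_of_mem _ hr))
    simpa using h2

-- A's nested foldl is the foldl over the pair stream
theorem pv_nested (events : List (String × List (List (String × Int))))
    {σ : Type} (F : String → σ → List (String × Int) → σ) (init : σ) :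
    events.foldl (fun d p => p.2.foldl (fun d e => F p.1 d e) d) init
      = (pvPairs events).foldl (fun d q => F q.1 d q.2) init := by
  induction events generalizing init with
  | nil => rfl
  | cons p es ih =>
    rw [List.foldl_cons]
    unfold pvPairs
    rw [List.flatMap_cons, List.foldl_append, List.foldl_map]
    exact ih _

theorem pv_pvG_pairs_nil (events : List (String × List (List (String × Int)))) (b : Option Int)
    (k : String) (hk : k ∉ events.map (fun p => p.1)) : pvG (pvPairs events) b k = [] := by
  unfold pvG
  rw [List.map_eq_nil_iff, List.filter_eq_nil_iff]
  intro q hq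
  rcases List.mem_flatMap.mp hq with ⟨p, hp, hq2⟩
  rcases List.mem_map.mp hq2 with ⟨e, _, rfl⟩
  simp only [Bool.and_eq_true, beq_iff_eq, not_and]
  intro h _
  exact hk (h ▸ List.mem_map.mpr ⟨p, hp, rfl⟩)

theorem pv_pvG_pairs (events : List (String × List (List (String × Int)))) (b : Option Int)
    (hnd : (events.map (fun p => p.1)).Nodup) (p : String × List (List (String × Int))) (hp : p ∈ events) :
    pvG (pvPairs events) b p.1 = p.2.filter (fun e => pvBlockNo e == b) := by
  induction events with
  | nil => cases hp
  | cons r es ih =>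
    have hsplit : pvPairs (r :: es) = r.2.map (fun e => (r.1, e)) ++ pvPairs es := by
      unfold pvPairs; rw [List.flatMap_cons]
    rw [hsplit]
    have happ : ∀ (X Y : List (String × List (String × Int))) (k : String),
        pvG (X ++ Y) b k = pvG X b k ++ pvG Y b k := by
      intro X Y k; unfold pvG; rw [List.filter_append, List.map_append]
    rw [happ]
    rw [List.map_cons, List.nodup_cons] at hnd
    rcases List.mem_cons.mp hp with hpr | hpe
    · subst hpr
      have h2 : pvG (pvPairs es) b p.1 = [] := by
        apply pv_pvG_pairs_nil
        exact hnd.1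
      rw [h2, List.append_nil]
      unfold pvG
      rw [List.filter_map, List.map_map]
      simp [Function.comp_def]
    · have hne : r.1 ≠ p.1 := by
        intro h
        exact hnd.1 (h ▸ List.mem_map.mpr ⟨p, hpe, rfl⟩)
      have h1 : pvG (r.2.map (fun e => (r.1, e))) b p.1 = [] := by
        unfold pvG
        rw [List.map_eq_nil_iff, List.filter_eq_nil_iff]
        intro q hq
        rcases List.mem_map.mp hq with ⟨e, _, rfl⟩
        simp [hne]
      rw [h1, List.nil_append]
      exact ih hnd.2 hpe

-- ===== VERDICT (by name: the statement is the Claim_ definition above) =====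
theorem pv_portA (events : List (String × List (List (String × Int)))) :
    distribute_events_by_blocks events
      = ((pvPairs events).foldl (fun dist q =>
          let bn := pvBlockNo q.2
          let dist := if dist.contains bn then dist
            else dist.insert bn
              (events.foldl (fun inner r => inner.insert r.1 ([] : List (List (String × Int)))) PySem.Dict.empty)
          dist.modify bn PySem.Dict.empty (fun inner => inner.modify q.1 [] (fun l => l ++ [q.2])))
        PySem.Dict.empty).items.map (fun q => (q.1, q.2.items)) := by
  unfold distribute_events_by_blocks
  exact congrArg (fun d => d.items.map (fun q => (q.1, q.2.items)))
    (pv_nested events (fun key dist event =>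
      let bn := pvBlockNo event
      let dist := if dist.contains bn then dist
        else dist.insert bn
          (events.foldl (fun inner r => inner.insert r.1 ([] : List (List (String × Int)))) PySem.Dict.empty)
      dist.modify bn PySem.Dict.empty (fun inner => inner.modify key [] (fun l => l ++ [event])))
      PySem.Dict.empty)

theorem pv_bns (events : List (String × List (List (String × Int)))) :
    (pvPairs events).map (fun q => pvBlockNo q.2) = events.flatMap (fun p => p.2.map pvBlockNo) := by
  unfold pvPairs
  rw [List.map_flatMap]
  simp [Function.comp_def]

theorem distribute_events_by_blocks_spec : Claim_equal_distribute_events_by_blocks := by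
  intro events _hdom hpre
  obtain ⟨hnd, _hinner⟩ := hpre
  unfold Spec_distribute_events_by_blocks
  rw [pv_portA]
  have hempty : (PySem.Dict.empty : PySem.Dict (Option Int) (PySem.Dict String (List (List (String × Int)))))
      = pvModel (events.map (fun p => p.1)) [] := rfl
  rw [hempty, pv_fold events (pvPairs events) [] hnd
    (fun q hq => by
      rcases List.mem_flatMap.mp hq with ⟨p, hp, hq2⟩
      rcases List.mem_map.mp hq2 with ⟨e, _, rfl⟩
      exact List.mem_map.mpr ⟨p, hp, rfl⟩),
    List.nil_append]
  unfold distribute_events_by_blocks_alt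
  rw [PySem.List.dedup_eq_ofList, ← pv_bns]
  show ((PySem.Set.ofList ((pvPairs events).map (fun q => pvBlockNo q.2))).map
      (fun b => (b, pvInner (events.map (fun p => p.1)) (pvPairs events) b))).map (fun q => (q.1, q.2.items)) = _
  rw [List.map_map]
  apply List.map_congr_left
  intro b _
  show (b, (pvInner (events.map (fun p => p.1)) (pvPairs events) b).items)
      = (b, events.map (fun p => (p.1, p.2.filter (fun e => pvBlockNo e == b))))
  congr 1
  show ((events.map (fun p => p.1)).map (fun k => (k, pvG (pvPairs events) b k))) = _
  rw [List.map_map]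
  apply List.map_congr_left
  intro p hp
  show (p.1, pvG (pvPairs events) b p.1) = (p.1, p.2.filter (fun e => pvBlockNo e == b))
  rw [pv_pvG_pairs events b hnd p hp]
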